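-- pv_equiv track=rewrite | github.com/illmakeithappen/javeed-plugins | javeed-ordio/javeed_ordio/eval_lite.py | _coverage_heatmap
-- ===== SOURCE A (Python) =====
-- from typing import Any
--
-- def _coverage_heatmap(
--     assignments: list[dict[str, Any]],
--     unassigned: list[dict[str, Any]],
-- ) -> list[dict[str, Any]]:
--     """Date x shift_type coverage grid."""
--     grid: dict[tuple[str, str], str] = {}
--     for a in assignments:
--         key = (a.get("date", ""), a.get("shift_type", ""))
--         grid[key] = "filled"
--     for u in unassigned:
--         key = (u.get("date", ""), u.get("shift_type", ""))
--         if key not in grid: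
--             grid[key] = "unfilled"
--     return [
--         {"date": dt, "shift_type": st, "status": status}
--         for (dt, st), status in sorted(grid.items())
--     ]
-- ===== SOURCE B (Python) =====
-- def _coverage_heatmap(assignments, unassigned):
--     """Date x shift_type coverage grid (merge-sort-dedup decomposition)."""
--     merged = [(a.get("date", ""), a.get("shift_type", ""), "filled") for a in assignments]
--     merged += [(u.get("date", ""), u.get("shift_type", ""), "unfilled") for u in unassigned]
--     merged.sort()  # 'filled' < 'unfilled', so filled wins on key collisions
--     out = []
--     prev = None
--     for dt, st, status in merged:
--         if prev != (dt, st):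
--             out.append({"date": dt, "shift_type": st, "status": status})
--             prev = (dt, st)
--     return out
-- ===== Notes on version B (the rewrite author's own statement) =====
-- stated objective: alternative
-- what changed: Replaces the two dict-building passes plus sorted(items) by building one merged (date, shift_type, status) tuple list, sorting it once (status as tiebreaker, 'filled' < 'unfilled'), and deduplicating by key in a single linear pass.
import Mathlib
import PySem

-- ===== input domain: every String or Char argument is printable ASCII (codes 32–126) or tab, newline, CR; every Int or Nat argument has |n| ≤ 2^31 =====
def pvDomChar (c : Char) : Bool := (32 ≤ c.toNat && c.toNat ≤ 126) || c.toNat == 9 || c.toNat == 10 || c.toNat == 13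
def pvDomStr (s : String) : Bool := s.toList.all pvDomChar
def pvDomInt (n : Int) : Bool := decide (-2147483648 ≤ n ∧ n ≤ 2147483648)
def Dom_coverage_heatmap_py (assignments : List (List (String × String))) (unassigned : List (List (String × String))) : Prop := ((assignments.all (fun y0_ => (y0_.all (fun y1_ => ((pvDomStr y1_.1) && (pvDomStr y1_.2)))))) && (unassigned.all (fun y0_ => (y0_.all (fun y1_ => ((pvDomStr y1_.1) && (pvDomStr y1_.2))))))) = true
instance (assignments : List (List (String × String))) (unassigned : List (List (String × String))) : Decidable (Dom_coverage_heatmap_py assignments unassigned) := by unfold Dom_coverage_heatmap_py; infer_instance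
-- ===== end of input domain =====

-- B changes A's decomposition: one merged (date, shift_type, status) list sorted once, then a
-- linear dedup-by-key pass, instead of A's two dict passes plus sorted(items) — objective: alternative (same cost).

-- shared accessor: d.get(k, dflt) on an insertion-ordered dict (first match)
def pvGet (d : List (String × String)) (k dflt : String) : String :=
  match d.find? (fun p => p.1 == k) with
  | some p => p.2
  | none => dflt

-- ===== PORT A =====
-- key = (a.get("date",""), a.get("shift_type",""))
def pvKey (d : List (String × String)) : String × String := (pvGet d "date" "", pvGet d "shift_type" "")

def coverage_heatmap_py (assignments : List (List (String × String))) (unassigned : List (List (String × String))) : List (List (String × String)) :=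
  let grid : PySem.Dict (String × String) String :=
    assignments.foldl (fun g a => g.insert (pvKey a) "filled") PySem.Dict.empty
  let grid :=
    unassigned.foldl (fun g u => if g.contains (pvKey u) then g else g.insert (pvKey u) "unfilled") grid
  -- sorted(grid.items()) : Python's tuple order = lexicographic ((date, shift_type), status)
  (PySem.List.sorted grid.items (fun p => toLex (p.1.1, toLex (p.1.2, p.2)))).map
    (fun p => [("date", p.1.1), ("shift_type", p.1.2), ("status", p.2)])

-- ===== PORT B =====
def coverage_heatmap_py_alt (assignments : List (List (String × String))) (unassigned : List (List (String × String))) : List (List (String × String)) :=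
  let merged : List (String × String × String) :=
    assignments.map (fun a => (pvGet a "date" "", pvGet a "shift_type" "", "filled"))
      ++ unassigned.map (fun u => (pvGet u "date" "", pvGet u "shift_type" "", "unfilled"))
  -- merged.sort() : lexicographic on the (date, shift_type, status) triple
  let ms := PySem.List.sorted merged (fun t => toLex (t.1, toLex (t.2.1, t.2.2)))
  (ms.foldl
    (fun (acc : List (List (String × String)) × Option (String × String)) t =>
      if acc.2 = some (t.1, t.2.1) then acc
      else (acc.1 ++ [[("date", t.1), ("shift_type", t.2.1), ("status", t.2.2)]], some (t.1, t.2.1)))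
    ([], none)).1

-- ===== PRECONDITION & SPEC =====
def Spec_coverage_heatmap_py (assignments : List (List (String × String))) (unassigned : List (List (String × String))) (out : List (List (String × String))) : Prop := out = coverage_heatmap_py_alt assignments unassigned
instance (assignments : List (List (String × String))) (unassigned : List (List (String × String))) (out : List (List (String × String))) : Decidable (Spec_coverage_heatmap_py assignments unassigned out) := by unfold Spec_coverage_heatmap_py; infer_instance

-- ===== CLAIM (what is proved, stated in full; the proofs are below) =====
def Claim_equal_coverage_heatmap_py : Prop := ∀ (assignments : List (List (String × String))) (unassigned : List (List (String × String))), Dom_coverage_heatmap_py assignments unassigned → Spec_coverage_heatmap_py assignments unassigned (coverage_heatmap_py assignments unassigned)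

-- ===== LEMMAS AND PROOFS =====

-- abbreviations used only by the proofs
def pvK3 (t : String × String × String) : Lex (String × Lex (String × String)) := toLex (t.1, toLex (t.2.1, t.2.2))
def pvKP (p : (String × String) × String) : Lex (String × Lex (String × String)) := toLex (p.1.1, toLex (p.1.2, p.2))
def pvKf (t : String × String × String) : String × String := (t.1, t.2.1)
def pvRow (t : String × String × String) : List (String × String) := [("date", t.1), ("shift_type", t.2.1), ("status", t.2.2)]
def pvAssoc (p : (String × String) × String) : String × String × String := (p.1.1, p.1.2, p.2)

def pvGridA (assignments unassigned : List (List (String × String))) : PySem.Dict (String × String) String :=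
  unassigned.foldl (fun g u => if g.contains (pvKey u) then g else g.insert (pvKey u) "unfilled")
    (assignments.foldl (fun g a => g.insert (pvKey a) "filled") PySem.Dict.empty)

def pvMerged (assignments unassigned : List (List (String × String))) : List (String × String × String) :=
  assignments.map (fun a => (pvGet a "date" "", pvGet a "shift_type" "", "filled"))
    ++ unassigned.map (fun u => (pvGet u "date" "", pvGet u "shift_type" "", "unfilled"))

def pvKept : List (String × String × String) → Option (String × String) → List (String × String × String)
  | [], _ => []
  | t :: ts, prev => if prev = some (t.1, t.2.1) then pvKept ts prev else t :: pvKept ts (some (t.1, t.2.1))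

-- the target predicate: which (key, status) pairs appear in the result
def pvM (assignments unassigned : List (List (String × String))) (t : String × String × String) : Prop :=
  (pvKf t ∈ assignments.map pvKey ∧ t.2.2 = "filled") ∨
  (pvKf t ∉ assignments.map pvKey ∧ pvKf t ∈ unassigned.map pvKey ∧ t.2.2 = "unfilled")

theorem covA_eq (a u : List (List (String × String))) :
    coverage_heatmap_py a u
      = (PySem.List.sorted (pvGridA a u).items pvKP).map (fun p => pvRow (pvAssoc p)) := rfl

theorem foldB_eq (ms : List (String × String × String))
    (acc : List (List (String × String))) (prev : Option (String × String)) :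
    (ms.foldl
      (fun (acc : List (List (String × String)) × Option (String × String)) t =>
        if acc.2 = some (t.1, t.2.1) then acc
        else (acc.1 ++ [[("date", t.1), ("shift_type", t.2.1), ("status", t.2.2)]], some (t.1, t.2.1)))
      (acc, prev)).1 = acc ++ (pvKept ms prev).map pvRow := by
  induction ms generalizing acc prev with
  | nil => simp [pvKept]
  | cons t ts ih =>
    simp only [List.foldl_cons, pvKept]
    by_cases h : prev = some (t.1, t.2.1)
    · simp [h, ih]
    · simp [h, ih, pvRow]

theorem covB_eq (a u : List (List (String × String))) :
    coverage_heatmap_py_alt a u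
      = (pvKept (PySem.List.sorted (pvMerged a u) pvK3) none).map pvRow := by
  show (_ : _ × _).1 = _
  rw [foldB_eq]
  rfl

-- ---- A-side characterization ----
theorem grid1_items (l : List (List (String × String))) (d : PySem.Dict (String × String) String)
    (p : (String × String) × String) :
    p ∈ (l.foldl (fun g a => g.insert (pvKey a) "filled") d).items ↔
      (p.1 ∈ l.map pvKey ∧ p.2 = "filled") ∨ (p ∈ d.items ∧ p.1 ∉ l.map pvKey) := by
  induction l generalizing d with
  | nil => simp
  | cons a l ih =>
    obtain ⟨k, v⟩ := p
    simp only [List.foldl_cons, ih, PySem.Dict.mem_items_insert, List.map_cons, List.mem_cons,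
      Prod.mk.injEq]
    by_cases hk : k = pvKey a <;> tauto

theorem grid1_nodup (l : List (List (String × String))) (d : PySem.Dict (String × String) String)
    (h : d.keys.Nodup) : (l.foldl (fun g a => g.insert (pvKey a) "filled") d).keys.Nodup := by
  induction l generalizing d with
  | nil => exact h
  | cons a l ih => exact ih _ (PySem.Dict.nodup_keys_insert _ _ _ h)

theorem grid2_items (l : List (List (String × String))) (d : PySem.Dict (String × String) String)
    (p : (String × String) × String) :
    p ∈ (l.foldl (fun g u => if g.contains (pvKey u) then g else g.insert (pvKey u) "unfilled") d).items ↔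
      p ∈ d.items ∨ (p.2 = "unfilled" ∧ p.1 ∉ d.keys ∧ p.1 ∈ l.map pvKey) := by
  induction l generalizing d with
  | nil => simp
  | cons a l ih =>
    obtain ⟨k, v⟩ := p
    simp only [List.foldl_cons]
    have hmemk : ((k, v) : (String × String) × String) ∈ d.items → k ∈ d.keys := fun h => by
      simpa [PySem.Dict.keys] using List.mem_map_of_mem (f := Prod.fst) h
    by_cases hc : d.contains (pvKey a)
    · have hk : pvKey a ∈ d.keys := (PySem.Dict.contains_iff_mem_keys _ _).1 hc
      rw [if_pos hc, ih]
      simp only [List.map_cons, List.mem_cons]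
      by_cases hkk : k = pvKey a <;> subst_vars <;> tauto
    · have hk : pvKey a ∉ d.keys := fun hm => hc ((PySem.Dict.contains_iff_mem_keys _ _).2 hm)
      rw [if_neg hc, ih]
      simp only [PySem.Dict.mem_items_insert, PySem.Dict.mem_keys_insert, List.map_cons,
        List.mem_cons, Prod.mk.injEq, not_or]
      by_cases hkk : k = pvKey a <;> subst_vars <;> tauto

theorem grid2_nodup (l : List (List (String × String))) (d : PySem.Dict (String × String) String)
    (h : d.keys.Nodup) :
    (l.foldl (fun g u => if g.contains (pvKey u) then g else g.insert (pvKey u) "unfilled") d).keys.Nodup := by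
  induction l generalizing d with
  | nil => exact h
  | cons a l ih =>
    simp only [List.foldl_cons]
    split
    · exact ih _ h
    · exact ih _ (PySem.Dict.nodup_keys_insert _ _ _ h)

theorem grid1_keys (l : List (List (String × String))) (k : String × String) :
    k ∈ (l.foldl (fun g a => g.insert (pvKey a) "filled") PySem.Dict.empty).keys ↔
      k ∈ l.map pvKey := by
  constructor
  · intro hkk
    rw [PySem.Dict.keys, List.mem_map] at hkk
    obtain ⟨p, hp, rfl⟩ := hkk
    rcases (grid1_items l PySem.Dict.empty p).1 hp with ⟨h, -⟩ | ⟨h, -⟩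
    · exact h
    · simp [PySem.Dict.empty] at h
  · intro hk
    rw [PySem.Dict.keys, List.mem_map]
    exact ⟨(k, "filled"), (grid1_items l _ (k, "filled")).2 (Or.inl ⟨hk, rfl⟩), rfl⟩

theorem gridA_items (a u : List (List (String × String))) (p : (String × String) × String) :
    p ∈ (pvGridA a u).items ↔ pvM a u (pvAssoc p) := by
  obtain ⟨⟨kd, ks⟩, v⟩ := p
  unfold pvGridA
  rw [grid2_items, grid1_items]
  simp only [grid1_keys, pvM, pvAssoc, pvKf]
  have : (((kd, ks), v) : (String × String) × String) ∈ PySem.Dict.empty.items ↔ False := by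
    simp [PySem.Dict.empty]
  tauto

theorem gridA_nodup (a u : List (List (String × String))) : (pvGridA a u).keys.Nodup := by
  exact grid2_nodup _ _ (grid1_nodup _ _ PySem.Dict.nodup_keys_empty)

-- ---- B-side characterization ----
-- ---- lexicographic-key facts ----
theorem k3_le_kf_le (x y : String × String × String) (h : pvK3 x ≤ pvK3 y) :
    (toLex (pvKf x) : Lex (String × String)) ≤ toLex (pvKf y) := by
  rw [pvK3, pvK3, Prod.Lex.le_iff] at h
  rw [Prod.Lex.le_iff]
  simp only [ofLex_toLex, pvKf] at h ⊢
  rcases h with h | ⟨h1, h2⟩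
  · exact Or.inl h
  · rw [Prod.Lex.le_iff] at h2
    simp only [ofLex_toLex] at h2
    rcases h2 with h2 | ⟨h2, _⟩
    · exact Or.inr ⟨h1, le_of_lt h2⟩
    · exact Or.inr ⟨h1, le_of_eq h2⟩

theorem k3_inj (x y : String × String × String) (h : pvK3 x = pvK3 y) : x = y := by
  rw [pvK3, pvK3, toLex_inj, Prod.mk.injEq] at h
  obtain ⟨h1, h2⟩ := h
  rw [toLex_inj, Prod.mk.injEq] at h2
  exact Prod.ext h1 (Prod.ext h2.1 h2.2)

theorem kf_k3_le_iff (x y : String × String × String) (h : pvKf x = pvKf y) :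
    pvK3 x ≤ pvK3 y ↔ x.2.2 ≤ y.2.2 := by
  rw [pvKf, pvKf, Prod.mk.injEq] at h
  rw [pvK3, pvK3, Prod.Lex.le_iff]
  simp only [ofLex_toLex, h.1, h.2, lt_irrefl, false_or, true_and, Prod.Lex.le_iff]

theorem kf_lt_of_le_ne (k k' : String × String) (hle : (toLex k : Lex (String × String)) ≤ toLex k')
    (hne : k ≠ k') : (toLex k : Lex (String × String)) < toLex k' :=
  lt_of_le_of_ne hle (fun h => hne (toLex_inj.mp h))

theorem kept_subset (ms : List (String × String × String)) (prev : Option (String × String))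
    (t : String × String × String) (h : t ∈ pvKept ms prev) : t ∈ ms := by
  induction ms generalizing prev with
  | nil => simp [pvKept] at h
  | cons x ts ih =>
    rw [pvKept] at h
    split at h
    · exact List.mem_cons_of_mem _ (ih _ h)
    · rcases List.mem_cons.mp h with rfl | h'
      · exact List.mem_cons_self ..
      · exact List.mem_cons_of_mem _ (ih _ h')

theorem kept_pairwise (ms : List (String × String × String)) (prev : Option (String × String))
    (hs : ms.Pairwise (fun x y => pvK3 x ≤ pvK3 y))
    (hp : ∀ t ∈ ms, ∀ k, prev = some k → (toLex k : Lex (String × String)) ≤ toLex (pvKf t)) :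
    (pvKept ms prev).Pairwise (fun x y => (toLex (pvKf x) : Lex (String × String)) < toLex (pvKf y)) ∧
      (∀ r ∈ pvKept ms prev, prev ≠ some (pvKf r)) := by
  induction ms generalizing prev with
  | nil => exact ⟨List.Pairwise.nil, by simp [pvKept]⟩
  | cons t ts ih =>
    obtain ⟨hhead, hts⟩ := List.pairwise_cons.mp hs
    rw [pvKept]
    by_cases hpv : prev = some (t.1, t.2.1)
    · rw [if_pos hpv]
      exact ih prev hts (fun t' ht' k hk => hp t' (List.mem_cons_of_mem _ ht') k hk)
    · rw [if_neg hpv]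
      have hp' : ∀ t' ∈ ts, ∀ k, some (t.1, t.2.1) = some k →
          (toLex k : Lex (String × String)) ≤ toLex (pvKf t') := by
        rintro t' ht' k hk
        injection hk with hk; subst hk
        exact k3_le_kf_le t t' (hhead t' ht')
      obtain ⟨ihp, ihne⟩ := ih (some (t.1, t.2.1)) hts hp'
      have hstrict : ∀ r ∈ pvKept ts (some (t.1, t.2.1)),
          (toLex (pvKf t) : Lex (String × String)) < toLex (pvKf r) := by
        intro r hr
        have hle : (toLex (pvKf t) : Lex (String × String)) ≤ toLex (pvKf r) :=
          k3_le_kf_le t r (hhead r (kept_subset ts _ r hr))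
        exact kf_lt_of_le_ne _ _ hle (fun h => ihne r hr (congrArg some h))
      refine ⟨List.pairwise_cons.mpr ⟨hstrict, ihp⟩, ?_⟩
      rintro r hr
      rcases List.mem_cons.mp hr with rfl | hr'
      · exact hpv
      · intro hpk
        have hkle : (toLex (pvKf r) : Lex (String × String)) ≤ toLex (pvKf t) :=
          hp t (List.mem_cons_self ..) (pvKf r) hpk
        exact absurd (lt_of_le_of_lt hkle (hstrict r hr')) (lt_irrefl _)

theorem kept_mem (ms : List (String × String × String)) (prev : Option (String × String))
    (hs : ms.Pairwise (fun x y => pvK3 x ≤ pvK3 y))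
    (hp : ∀ t ∈ ms, ∀ k, prev = some k → (toLex k : Lex (String × String)) ≤ toLex (pvKf t))
    (t : String × String × String) :
    t ∈ pvKept ms prev ↔
      t ∈ ms ∧ prev ≠ some (pvKf t) ∧ ∀ t' ∈ ms, pvKf t' = pvKf t → pvK3 t ≤ pvK3 t' := by
  induction ms generalizing prev with
  | nil => simp [pvKept]
  | cons h0 ts ih =>
    obtain ⟨hhead, hts⟩ := List.pairwise_cons.mp hs
    rw [pvKept]
    by_cases hpv : prev = some (h0.1, h0.2.1)
    · rw [if_pos hpv]
      have hp' : ∀ t' ∈ ts, ∀ k, prev = some k →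
          (toLex k : Lex (String × String)) ≤ toLex (pvKf t') :=
        fun t' ht' k hk => hp t' (List.mem_cons_of_mem _ ht') k hk
      rw [ih prev hts hp']
      constructor
      · rintro ⟨hmem, hne, hmin⟩
        refine ⟨List.mem_cons_of_mem _ hmem, hne, ?_⟩
        rintro t' ht' hkf
        rcases List.mem_cons.mp ht' with rfl | ht'
        · exact absurd (by rw [hpv]; exact congrArg some hkf) hne
        · exact hmin t' ht' hkf
      · rintro ⟨hmem, hne, hmin⟩
        rcases List.mem_cons.mp hmem with rfl | hmem
        · exact absurd hpv hne
        · exact ⟨hmem, hne, fun t' ht' hkf => hmin t' (List.mem_cons_of_mem _ ht') hkf⟩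
    · rw [if_neg hpv]
      have hp' : ∀ t' ∈ ts, ∀ k, some (h0.1, h0.2.1) = some k →
          (toLex k : Lex (String × String)) ≤ toLex (pvKf t') := by
        rintro t' ht' k hk
        injection hk with hk; subst hk
        exact k3_le_kf_le h0 t' (hhead t' ht')
      rw [List.mem_cons, ih (some (h0.1, h0.2.1)) hts hp']
      constructor
      · rintro (rfl | ⟨hmem, hne, hmin⟩)
        · refine ⟨List.mem_cons_self .., hpv, ?_⟩
          rintro t' ht' hkf
          rcases List.mem_cons.mp ht' with rfl | ht'
          · exact le_refl _
          · exact hhead t' ht'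
        · have hkne : pvKf h0 ≠ pvKf t := fun h => hne (congrArg some h)
          refine ⟨List.mem_cons_of_mem _ hmem, ?_, ?_⟩
          · rintro hpk
            have h1 : (toLex (pvKf t) : Lex (String × String)) ≤ toLex (pvKf h0) :=
              hp h0 (List.mem_cons_self ..) (pvKf t) hpk
            have h2 : pvKf t ≠ pvKf h0 := fun h => hpv (by rw [hpk]; exact congrArg some h)
            have h3 : (toLex (pvKf h0) : Lex (String × String)) ≤ toLex (pvKf t) :=
              k3_le_kf_le h0 t (hhead t hmem)
            exact h2 (toLex_inj.mp (le_antisymm h1 h3))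
          · rintro t' ht' hkf
            rcases List.mem_cons.mp ht' with rfl | ht'
            · exact absurd hkf hkne
            · exact hmin t' ht' hkf
      · rintro ⟨hmem, hne, hmin⟩
        rcases List.mem_cons.mp hmem with rfl | hmem
        · exact Or.inl rfl
        · by_cases hkf : pvKf h0 = pvKf t
          · left
            have h1 : pvK3 t ≤ pvK3 h0 := hmin h0 (List.mem_cons_self ..) hkf
            have h2 : pvK3 h0 ≤ pvK3 t := hhead t hmem
            exact k3_inj _ _ (le_antisymm h1 h2)
          · exact Or.inr ⟨hmem, fun h => hkf (Option.some.inj h),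
              fun t' ht' hk => hmin t' (List.mem_cons_of_mem _ ht') hk⟩

theorem merged_mem (a u : List (List (String × String))) (t : String × String × String) :
    t ∈ pvMerged a u ↔
      (pvKf t ∈ a.map pvKey ∧ t.2.2 = "filled") ∨ (pvKf t ∈ u.map pvKey ∧ t.2.2 = "unfilled") := by
  obtain ⟨dt, st, v⟩ := t
  simp only [pvMerged, List.mem_append, List.mem_map]
  constructor
  · rintro (⟨x, hx, h⟩ | ⟨x, hx, h⟩) <;>
      (simp only [Prod.mk.injEq] at h; obtain ⟨rfl, rfl, rfl⟩ := h)
    · exact Or.inl ⟨⟨x, hx, rfl⟩, rfl⟩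
    · exact Or.inr ⟨⟨x, hx, rfl⟩, rfl⟩
  · rintro (⟨⟨x, hx, h⟩, hv⟩ | ⟨⟨x, hx, h⟩, hv⟩) <;>
      simp only [pvKey, pvKf, Prod.mk.injEq] at h hv
    · exact Or.inl ⟨x, hx, by simp [h.1, h.2, hv]⟩
    · exact Or.inr ⟨x, hx, by simp [h.1, h.2, hv]⟩

theorem keptB_mem (a u : List (List (String × String))) (t : String × String × String) :
    t ∈ pvKept (PySem.List.sorted (pvMerged a u) pvK3) none ↔ pvM a u t := by
  have hs : (PySem.List.sorted (pvMerged a u) pvK3).Pairwise (fun x y => pvK3 x ≤ pvK3 y) :=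
    PySem.List.sorted_pairwise _ _
  have hp : ∀ t' ∈ PySem.List.sorted (pvMerged a u) pvK3, ∀ k, (none : Option (String × String)) = some k →
      (toLex k : Lex (String × String)) ≤ toLex (pvKf t') := by rintro _ _ _ ⟨⟩
  rw [kept_mem _ none hs hp]
  have hflt : ("filled" : String) ≤ "unfilled" := by simp [String.le_iff_toList_le]; decide
  have hnlt : ¬ ("unfilled" : String) ≤ "filled" := by simp [String.le_iff_toList_le]; decide
  constructor
  · rintro ⟨hmem, -, hmin⟩
    rw [PySem.List.mem_sorted, merged_mem] at hmem
    rcases hmem with ⟨hka, hst⟩ | ⟨hku, hst⟩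
    · exact Or.inl ⟨hka, hst⟩
    · refine Or.inr ⟨?_, hku, hst⟩
      intro hka
      have hm' : (t.1, t.2.1, "filled") ∈ PySem.List.sorted (pvMerged a u) pvK3 := by
        rw [PySem.List.mem_sorted, merged_mem]
        exact Or.inl ⟨hka, rfl⟩
      have hle := hmin _ hm' rfl
      rw [kf_k3_le_iff t (t.1, t.2.1, "filled") rfl, hst] at hle
      exact hnlt hle
  · rintro (⟨hka, hst⟩ | ⟨hna, hku, hst⟩)
    · refine ⟨?_, by simp, ?_⟩
      · rw [PySem.List.mem_sorted, merged_mem]; exact Or.inl ⟨hka, hst⟩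
      · rintro t' ht' hkf
        rw [PySem.List.mem_sorted, merged_mem] at ht'
        rw [kf_k3_le_iff _ _ hkf.symm, hst]
        rcases ht' with ⟨-, hst'⟩ | ⟨-, hst'⟩
        · rw [hst']
        · rw [hst']; exact hflt
    · refine ⟨?_, by simp, ?_⟩
      · rw [PySem.List.mem_sorted, merged_mem]; exact Or.inr ⟨hku, hst⟩
      · rintro t' ht' hkf
        rw [PySem.List.mem_sorted, merged_mem] at ht'
        rcases ht' with ⟨hka', -⟩ | ⟨-, hst'⟩
        · rw [hkf] at hka'; exact absurd hka' hna
        · rw [kf_k3_le_iff _ _ hkf.symm, hst, hst']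

-- ---- gluing ----
theorem pairs_eq (a u : List (List (String × String))) :
    (PySem.List.sorted (pvGridA a u).items pvKP).map pvAssoc
      = pvKept (PySem.List.sorted (pvMerged a u) pvK3) none := by
  have hsB : (PySem.List.sorted (pvMerged a u) pvK3).Pairwise (fun x y => pvK3 x ≤ pvK3 y) :=
    PySem.List.sorted_pairwise _ _
  have hpB : ∀ t' ∈ PySem.List.sorted (pvMerged a u) pvK3, ∀ k,
      (none : Option (String × String)) = some k →
      (toLex k : Lex (String × String)) ≤ toLex (pvKf t') := by rintro _ _ _ ⟨⟩
  -- strict key-pairwise of the B-side list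
  have h2 : (pvKept (PySem.List.sorted (pvMerged a u) pvK3) none).Pairwise
      (fun x y => (toLex (pvKf x) : Lex (String × String)) < toLex (pvKf y)) :=
    (kept_pairwise _ none hsB hpB).1
  -- strict key-pairwise of the A-side list
  have hnd : ((PySem.List.sorted (pvGridA a u).items pvKP).map Prod.fst).Nodup := by
    have hperm : ((PySem.List.sorted (pvGridA a u).items pvKP).map Prod.fst).Perm
        ((pvGridA a u).items.map Prod.fst) :=
      (PySem.List.sorted_perm (pvGridA a u).items pvKP false).map Prod.fst
    exact (hperm.nodup_iff).2 (gridA_nodup a u)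
  have hfstne : (PySem.List.sorted (pvGridA a u).items pvKP).Pairwise
      (fun p q => p.1 ≠ q.1) := List.pairwise_map.mp hnd
  have hle : (PySem.List.sorted (pvGridA a u).items pvKP).Pairwise
      (fun p q => pvKP p ≤ pvKP q) := PySem.List.sorted_pairwise _ _
  have h1 : ((PySem.List.sorted (pvGridA a u).items pvKP).map pvAssoc).Pairwise
      (fun x y => (toLex (pvKf x) : Lex (String × String)) < toLex (pvKf y)) := by
    rw [List.pairwise_map]
    refine (hle.and hfstne).imp ?_
    rintro p q ⟨hpq, hne⟩
    exact kf_lt_of_le_ne _ _ (k3_le_kf_le (pvAssoc p) (pvAssoc q) hpq)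
      (fun h => hne (by simpa [pvAssoc, pvKf, Prod.ext_iff] using h))
  -- memberships
  have m1 : ∀ t, t ∈ (PySem.List.sorted (pvGridA a u).items pvKP).map pvAssoc ↔ pvM a u t := by
    intro t
    rw [List.mem_map]
    constructor
    · rintro ⟨p, hp, rfl⟩
      exact (gridA_items a u p).1 ((PySem.List.mem_sorted _ _ _ _).1 hp)
    · intro hM
      refine ⟨((t.1, t.2.1), t.2.2), (PySem.List.mem_sorted _ _ _ _).2 ?_, rfl⟩
      exact (gridA_items a u ((t.1, t.2.1), t.2.2)).2 hM
  have m2 := keptB_mem a u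
  -- nodup from strict pairwise
  have n1 : ((PySem.List.sorted (pvGridA a u).items pvKP).map pvAssoc).Nodup :=
    h1.imp (fun {x y} hlt he => absurd (congrArg (fun t => (toLex (pvKf t) : Lex (String × String))) he) (ne_of_lt hlt))
  have n2 : (pvKept (PySem.List.sorted (pvMerged a u) pvK3) none).Nodup :=
    h2.imp (fun {x y} hlt he => absurd (congrArg (fun t => (toLex (pvKf t) : Lex (String × String))) he) (ne_of_lt hlt))
  have hperm : (pvKept (PySem.List.sorted (pvMerged a u) pvK3) none).Perm
      ((PySem.List.sorted (pvGridA a u).items pvKP).map pvAssoc) :=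
    (List.perm_ext_iff_of_nodup n2 n1).2 (fun t => (m2 t).trans (m1 t).symm)
  calc (PySem.List.sorted (pvGridA a u).items pvKP).map pvAssoc
      = PySem.List.sorted ((PySem.List.sorted (pvGridA a u).items pvKP).map pvAssoc)
          (fun t => (toLex (pvKf t) : Lex (String × String))) :=
        (PySem.List.sorted_eq_of_perm_of_pairwise_lt _ _ _ (List.Perm.refl _) h1).symm
    _ = pvKept (PySem.List.sorted (pvMerged a u) pvK3) none :=
        PySem.List.sorted_eq_of_perm_of_pairwise_lt _ _ _ hperm h2

-- ===== VERDICT (by name: the statement is the Claim_ definition above) =====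
theorem coverage_heatmap_py_spec : Claim_equal_coverage_heatmap_py := by
  intro a u _
  show coverage_heatmap_py a u = coverage_heatmap_py_alt a u
  rw [covA_eq, covB_eq, ← pairs_eq, List.map_map]
  rfl
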